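-- pv_equiv track=rewrite | github.com/adrianoggm/Onion-FL | comparativa_completa/comparativa_wesad_swell.py | _group_wesad_features
-- ===== SOURCE A (Python) =====
-- from typing import Dict, List, Tuple
--
-- def _group_wesad_features(feature_names: List[str]) -> Dict[str, int]:
--     groups: Dict[str, int] = {}
--     for name in feature_names:
--         if name.startswith("acc_"):
--             key = "acc"
--         else:
--             key = name.split("_", 1)[0]
--         groups[key] = groups.get(key, 0) + 1
--     return groups
-- ===== SOURCE B (Python) =====
-- from typing import Dict, List
--
-- def _group_wesad_features(feature_names: List[str]) -> Dict[str, int]: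
--     keys = ["acc" if n.startswith("acc_") else n.split("_", 1)[0] for n in feature_names]
--     s = sorted(keys)
--     counts = {}
--     i = 0
--     while i < len(s):
--         j = i
--         while j < len(s) and s[j] == s[i]:
--             j += 1
--         counts[s[i]] = j - i
--         i = j
--     return {k: counts[k] for k in dict.fromkeys(keys)}
-- ===== Notes on version B (the rewrite author's own statement) =====
-- stated objective: alternative
-- what changed: Replaces the one-pass dict accumulation (get+1 per name) by a sort-then-group decomposition: map every name to its group key, sort the keys, count each run of equal keys in one scan, and emit the counts in first-occurrence key order via dict.fromkeys.
import Mathlib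
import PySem

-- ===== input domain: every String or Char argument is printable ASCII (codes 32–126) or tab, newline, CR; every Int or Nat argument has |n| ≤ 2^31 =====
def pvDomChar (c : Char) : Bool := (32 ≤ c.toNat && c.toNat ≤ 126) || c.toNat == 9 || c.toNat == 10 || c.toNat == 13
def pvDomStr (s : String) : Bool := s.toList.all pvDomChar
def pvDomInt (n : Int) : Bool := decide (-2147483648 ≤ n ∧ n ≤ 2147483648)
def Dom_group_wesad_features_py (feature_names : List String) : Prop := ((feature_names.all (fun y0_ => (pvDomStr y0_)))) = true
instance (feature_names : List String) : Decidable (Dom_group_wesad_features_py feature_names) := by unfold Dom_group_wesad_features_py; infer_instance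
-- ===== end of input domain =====

-- B: sort-then-group decomposition (map names to keys, sort, count runs of equal keys, emit in first-occurrence order) instead of A's one-pass dict accumulation; alternative structure, not claimed faster.
-- ===== PORT A =====
-- key = "acc" if name.startswith("acc_") else name.split("_", 1)[0]   (same expression in both Pythons)
def pvKey (name : String) : String :=
  if PySem.Str.startswith name "acc_" then "acc"
  else (((PySem.Str.splitMax? name "_" 1).getD []).headD "")

def group_wesad_features_py (feature_names : List String) : List (String × Int) :=
  (feature_names.foldl
    (fun groups name =>
      let key := pvKey name
      groups.insert key (groups.getD key 0 + 1))
    PySem.Dict.empty).items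

-- ===== PORT B =====
-- run-length counting over the sorted key list; the Python index-based while loop is ported as the
-- obvious structural recursion over the same state (run = the j-scan, i.e. head + takeWhile; tail = the rest) — exact
def pvRunCounts : List String → PySem.Dict String Int → PySem.Dict String Int
  | [], counts => counts
  | x :: rest, counts =>
      pvRunCounts (rest.dropWhile (fun y => y == x))
        (counts.insert x (((rest.takeWhile (fun y => y == x)).length : Int) + 1))
  termination_by l _ => l.length
  decreasing_by
    simp only [List.length_cons]
    exact Nat.lt_succ_of_le (List.length_dropWhile_le _ _)

def group_wesad_features_py_alt (feature_names : List String) : List (String × Int) :=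
  let keys := feature_names.map pvKey
  let s := PySem.List.sorted keys (fun x => x) false
  let counts := pvRunCounts s PySem.Dict.empty
  -- counts[k]: every k drawn from dict.fromkeys(keys) is a key of counts, so the lookup never raises; exact
  (PySem.List.dedup keys).map (fun k => (k, counts.getD k 0))

-- ===== PRECONDITION & SPEC =====
def Spec_group_wesad_features_py (feature_names : List String) (out : List (String × Int)) : Prop := out = group_wesad_features_py_alt feature_names
instance (feature_names : List String) (out : List (String × Int)) : Decidable (Spec_group_wesad_features_py feature_names out) := by unfold Spec_group_wesad_features_py; infer_instance

-- ===== CLAIM (what is proved, stated in full; the proofs are below) =====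
def Claim_equal_group_wesad_features_py : Prop := ∀ (feature_names : List String), Dom_group_wesad_features_py feature_names → Spec_group_wesad_features_py feature_names (group_wesad_features_py feature_names)

-- ===== LEMMAS AND PROOFS =====

-- ===== VERDICT (by name: the statement is the Claim_ definition above) =====



-- the head of dropWhile fails the predicate
theorem pvDropWhile_head_false {α : Type} (p : α → Bool) :
    ∀ (l : List α) (z : α) (t : List α), l.dropWhile p = z :: t → p z = false := by
  intro l
  induction l with
  | nil => simp [List.dropWhile]
  | cons a l ih =>
      intro z t h
      by_cases hp : p a
      · rw [List.dropWhile_cons_of_pos hp] at h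
        exact ih _ _ h
      · rw [List.dropWhile_cons_of_neg hp] at h
        cases h
        simpa using hp

-- runs of a key not present leave its entry untouched
theorem pvRunCounts_getD_not_mem (s : List String) (d : PySem.Dict String Int) (k : String)
    (hk : k ∉ s) : (pvRunCounts s d).getD k 0 = d.getD k 0 := by
  induction s, d using pvRunCounts.induct with
  | case1 d => rw [pvRunCounts]
  | case2 x rest d ih =>
      rw [pvRunCounts]
      have hkx : k ≠ x := fun h => hk (h ▸ List.mem_cons_self ..)
      have hkr : k ∉ rest := fun h => hk (List.mem_cons_of_mem _ h)
      rw [ih (fun h => hkr (List.Sublist.mem h (List.dropWhile_sublist _)))]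
      simp [PySem.Dict.getD_insert, hkx]

-- on a sorted list every key's occurrences form one run, so its entry is its total count
theorem pvRunCounts_getD_mem (s : List String) (d : PySem.Dict String Int) (k : String)
    (hs : s.Pairwise (· ≤ ·)) (hk : k ∈ s) :
    (pvRunCounts s d).getD k 0 = (s.count k : Int) := by
  induction s, d using pvRunCounts.induct with
  | case1 d => exact absurd hk (List.not_mem_nil)
  | case2 x rest d ih =>
      rw [pvRunCounts]
      have hrun : ∀ y ∈ rest.takeWhile (fun y => y == x), y = x := by
        intro y hy
        simpa using List.mem_takeWhile_imp hy
      have hsp : rest.Pairwise (· ≤ ·) := (List.pairwise_cons.mp hs).2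
      have hxle : ∀ y ∈ rest, x ≤ y := (List.pairwise_cons.mp hs).1
      have htail : ∀ y ∈ rest.dropWhile (fun y => y == x), y ≠ x := by
        intro y hy
        cases hdw : rest.dropWhile (fun y => y == x) with
        | nil => rw [hdw] at hy; exact absurd hy (List.not_mem_nil)
        | cons z t =>
            have hzx : z ≠ x := by
              have := pvDropWhile_head_false (fun y => y == x) rest z t hdw
              simpa using this
            have hzr : z ∈ rest :=
              List.Sublist.mem (hdw ▸ List.mem_cons_self ..) (List.dropWhile_sublist _)
            have hxz : x < z := lt_of_le_of_ne (hxle z hzr) (fun h => hzx h.symm)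
            rw [hdw] at hy
            rcases List.mem_cons.mp hy with h | h
            · exact fun he => hzx (h ▸ he)
            · have htp : (z :: t).Pairwise (· ≤ ·) := by
                have := hsp.sublist (List.dropWhile_sublist (fun y => y == x))
                rwa [hdw] at this
              have hzy : z ≤ y := (List.pairwise_cons.mp htp).1 y h
              exact fun he => absurd (he ▸ hzy : z ≤ x) (not_le.mpr hxz)
      have hdecomp := List.takeWhile_append_dropWhile (p := fun y => y == x) (l := rest)
      have hcount : rest.count k
          = (rest.takeWhile (fun y => y == x)).count k
            + (rest.dropWhile (fun y => y == x)).count k := by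
        conv_lhs => rw [← hdecomp]
        rw [List.count_append]
      by_cases hkx : k = x
      · subst hkx
        have hnm : k ∉ rest.dropWhile (fun y => y == k) := fun h => htail k h rfl
        rw [pvRunCounts_getD_not_mem _ _ _ hnm, PySem.Dict.getD_insert_self]
        have hc1 : (rest.takeWhile (fun y => y == k)).count k
            = (rest.takeWhile (fun y => y == k)).length :=
          List.count_eq_length.mpr (fun y hy => ((hrun y hy).symm : k = y) ▸ rfl)
        have hc2 : (rest.dropWhile (fun y => y == k)).count k = 0 :=
          List.count_eq_zero.mpr hnm
        rw [List.count_cons_self, hcount, hc1, hc2]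
        push_cast
        ring
      · have hkr : k ∈ rest := (List.mem_cons.mp hk).resolve_left hkx
        have hknr : k ∉ rest.takeWhile (fun y => y == x) := fun h => hkx (hrun k h)
        have hkt : k ∈ rest.dropWhile (fun y => y == x) := by
          have hk2 := hkr
          rw [← hdecomp] at hk2
          exact (List.mem_append.mp hk2).resolve_left hknr
        rw [ih (hsp.sublist (List.dropWhile_sublist _)) hkt,
          List.count_cons_of_ne (Ne.symm hkx), hcount, List.count_eq_zero.mpr hknr]
        simp

theorem group_wesad_features_py_spec : Claim_equal_group_wesad_features_py := by
  intro fns _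
  unfold Spec_group_wesad_features_py group_wesad_features_py group_wesad_features_py_alt
  rw [show (fun (groups : PySem.Dict String Int) name =>
        let key := pvKey name
        groups.insert key (groups.getD key 0 + 1)) =
      (fun groups name => groups.insert (pvKey name) (groups.getD (pvKey name) 0 + 1)) from rfl,
    ← List.foldl_map (f := pvKey) (g := fun (d : PySem.Dict String Int) k => d.insert k (d.getD k 0 + 1)),
    PySem.Dict.foldl_insert_getD_add_one_eq_counter, PySem.Dict.items_counter]
  refine List.map_congr_left ?_
  intro k hk
  have hmem : k ∈ (fns.map pvKey) := by
    have hk2 : k ∈ PySem.List.dedup (fns.map pvKey) := by simpa using hk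
    simpa using hk2
  have hks : k ∈ PySem.List.sorted (fns.map pvKey) (fun x => x) false :=
    (PySem.List.mem_sorted ..).mpr hmem
  have hpair : (PySem.List.sorted (fns.map pvKey) (fun x => x) false).Pairwise (· ≤ ·) := by
    simpa using PySem.List.sorted_pairwise (fns.map pvKey) (fun x => x)
  rw [pvRunCounts_getD_mem _ _ _ hpair hks,
    (PySem.List.sorted_perm (fns.map pvKey) (fun x => x) false).count_eq]
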